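-- pv_equiv track=rewrite | github.com/fredyoung007/fredyoung007 | py/max.py | durDict
-- ===== SOURCE A (Python) =====
-- def durDict(song_list):
--     dict = {}
--     duration = 0
--     artist = ""
--     for song in song_list:
--         if artist == song[1]:
--             duration += song[2]
--         else:
--             artist = song[1]
--             duration = song[2]
--
--         dict[artist] = duration
--
--     return dict
-- ===== SOURCE B (Python) =====
-- def durDict(song_list):
--     # Phase 1: split the list into maximal consecutive same-artist runs.
--     runs = []
--     rest = song_list
--     while rest:
--         artist = rest[0][1]
--         i = 1
--         while i < len(rest) and rest[i][1] == artist: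
--             i += 1
--         runs.append((artist, rest[:i]))
--         rest = rest[i:]
--     # Phase 2: total each run (seeded from its first song); later runs overwrite.
--     result = {}
--     for artist, run in runs:
--         total = run[0][2]
--         for s in run[1:]:
--             total += s[2]
--         result[artist] = total
--     return result
-- ===== Notes on version B (the rewrite author's own statement) =====
-- stated objective: alternative
-- what changed: Replaces A's single flat loop carrying dict/duration/artist state with a two-phase pass: first split the list into maximal consecutive same-artist runs, then total each run and assign it, so no running state crosses the branch.
import Mathlib
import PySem

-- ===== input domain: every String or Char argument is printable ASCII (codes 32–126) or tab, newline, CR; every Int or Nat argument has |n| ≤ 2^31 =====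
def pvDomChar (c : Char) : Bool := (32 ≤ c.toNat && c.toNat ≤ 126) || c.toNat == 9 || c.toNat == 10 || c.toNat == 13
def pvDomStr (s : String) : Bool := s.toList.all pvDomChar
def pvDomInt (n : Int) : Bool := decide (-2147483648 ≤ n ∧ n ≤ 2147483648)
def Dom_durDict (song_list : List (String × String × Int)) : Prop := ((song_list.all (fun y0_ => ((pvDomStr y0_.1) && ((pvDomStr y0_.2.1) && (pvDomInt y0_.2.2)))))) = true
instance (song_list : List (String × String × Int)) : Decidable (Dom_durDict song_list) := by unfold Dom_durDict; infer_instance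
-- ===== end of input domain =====

-- B rephrases A's flat stateful loop as: split into maximal consecutive same-artist runs, then total each run; equal results.

-- ===== PORT A =====
-- the for-loop of A: state (dict, duration, artist), one step per song
def durDictA_loop (d : PySem.Dict String Int) (duration : Int) (artist : String) :
    List (String × String × Int) → PySem.Dict String Int
  | [] => d
  | song :: rest =>
      let duration' := if artist == song.2.1 then duration + song.2.2 else song.2.2
      let artist' := song.2.1
      durDictA_loop (d.insert artist' duration') duration' artist' rest

def durDict (song_list : List (String × String × Int)) : List (String × Int) :=
  (durDictA_loop PySem.Dict.empty 0 "" song_list).items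

-- ===== PORT B =====
-- phase 1 of B: the outer while-loop; the inner index scan `i` is the takeWhile/dropWhile split of `rest`
def durDictB_runs : List (String × String × Int) → List (String × List (String × String × Int))
  | [] => []
  | s :: rest =>
      (s.2.1, s :: rest.takeWhile (fun t => t.2.1 == s.2.1)) ::
        durDictB_runs (rest.dropWhile (fun t => t.2.1 == s.2.1))
termination_by l => l.length
decreasing_by
  simp only [List.length_cons]
  exact Nat.lt_succ_of_le (List.length_dropWhile_le _ _)

-- phase 2 of B: total each run (seed = first song's duration) and assign it
def durDictB_fill (d : PySem.Dict String Int) :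
    List (String × List (String × String × Int)) → PySem.Dict String Int
  | [] => d
  | (artist, run) :: rs =>
      match run with
      | [] => durDictB_fill d rs   -- unreachable: runs are nonempty by construction
      | s :: t =>
          durDictB_fill (d.insert artist (t.foldl (fun total x => total + x.2.2) s.2.2)) rs

def durDict_alt (song_list : List (String × String × Int)) : List (String × Int) :=
  (durDictB_fill PySem.Dict.empty (durDictB_runs song_list)).items

-- ===== PRECONDITION & SPEC =====
def Spec_durDict (song_list : List (String × String × Int)) (out : List (String × Int)) : Prop := out = durDict_alt song_list
instance (song_list : List (String × String × Int)) (out : List (String × Int)) : Decidable (Spec_durDict song_list out) := by unfold Spec_durDict; infer_instance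

-- ===== CLAIM (what is proved, stated in full; the proofs are below) =====
def Claim_equal_durDict : Prop := ∀ (song_list : List (String × String × Int)), Dom_durDict song_list → Spec_durDict song_list (durDict song_list)

-- ===== LEMMAS AND PROOFS =====

-- heads produced by dropWhile fail the predicate
lemma dropWhile_head_false {α : Type} (p : α → Bool) :
    ∀ (l : List α) (s : α) (t : List α), l.dropWhile p = s :: t → p s = false := by
  intro l
  induction l with
  | nil => intro s t h; simp [List.dropWhile] at h
  | cons x xs ih =>
      intro s t h
      by_cases hp : p x = true
      · rw [List.dropWhile_cons_of_pos hp] at h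
        exact ih s t h
      · rw [List.dropWhile_cons_of_neg hp] at h
        cases h; simpa using hp

-- within a run of artist a, A's loop just accumulates into the same key
lemma loop_sameRun (a : String) :
    ∀ (run : List (String × String × Int)), (∀ s ∈ run, s.2.1 = a) →
    ∀ (l : List (String × String × Int)) (d : PySem.Dict String Int) (v : Int),
    durDictA_loop (d.insert a v) v a (run ++ l)
      = durDictA_loop (d.insert a (run.foldl (fun total x => total + x.2.2) v))
          (run.foldl (fun total x => total + x.2.2) v) a l := by
  intro run
  induction run with
  | nil => intro _ l d v; simp
  | cons s t ih =>
      intro hall l d v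
      have hs : s.2.1 = a := hall s (by simp)
      have hbeq : (a == s.2.1) = true := by simp [hs]
      simp only [List.cons_append, durDictA_loop, hbeq, if_pos]
      rw [hs, PySem.Dict.insert_insert_self]
      have := ih (fun x hx => hall x (by simp [hx])) l d (v + s.2.2)
      simpa using this

-- main invariant: whenever (artist matches the head → duration = 0), A's loop from
-- (d, duration, artist) computes B's fill of the runs of the remaining list into d
lemma loop_eq_fill :
    ∀ (n : Nat) (l : List (String × String × Int)), l.length ≤ n →
    ∀ (d : PySem.Dict String Int) (dur : Int) (art : String),
    (∀ s t, l = s :: t → s.2.1 = art → dur = 0) →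
    durDictA_loop d dur art l = durDictB_fill d (durDictB_runs l) := by
  intro n
  induction n with
  | zero =>
      intro l hl d dur art _
      have : l = [] := List.length_eq_zero_iff.mp (Nat.le_zero.mp hl)
      subst this
      simp [durDictA_loop, durDictB_runs, durDictB_fill]
  | succ n ih =>
      intro l hl d dur art hstart
      cases l with
      | nil => simp [durDictA_loop, durDictB_runs, durDictB_fill]
      | cons s rest =>
          have hsplit := List.takeWhile_append_dropWhile (p := fun t => t.2.1 == s.2.1) (l := rest)
          set run := rest.takeWhile (fun t => t.2.1 == s.2.1) with hrun
          set rest' := rest.dropWhile (fun t => t.2.1 == s.2.1) with hrest'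
          have hallrun : ∀ x ∈ run, x.2.1 = s.2.1 := by
            intro x hx
            have := List.mem_takeWhile_imp hx
            simpa using this
          have hlen' : rest'.length ≤ n := by
            have h1 : rest'.length ≤ rest.length := by
              rw [hrest']; exact List.length_dropWhile_le _ _
            have h2 : rest.length + 1 ≤ n + 1 := by simpa using hl
            omega
          have hnext : ∀ x t, rest' = x :: t → x.2.1 = s.2.1 → (0 : Int) = 0 := by
            intro _ _ _ _; rfl
          -- A side: first element then the rest of the run
          have hbody :
              durDictA_loop d dur art (s :: rest)
                = durDictA_loop (d.insert s.2.1 s.2.2) s.2.2 s.2.1 rest := by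
            by_cases hsame : (art == s.2.1) = true
            · have hart : s.2.1 = art := (beq_iff_eq.mp hsame).symm
              have hdur : dur = 0 := hstart s rest rfl hart
              simp [durDictA_loop, hdur, hart]
            · simp [durDictA_loop, hsame]
          have hA : durDictA_loop d dur art (s :: rest)
              = durDictB_fill (d.insert s.2.1 (run.foldl (fun total x => total + x.2.2) s.2.2))
                  (durDictB_runs rest') := by
            rw [hbody]
            have hrw : rest = run ++ rest' := hsplit.symm
            rw [hrw, loop_sameRun s.2.1 run hallrun rest' d s.2.2]
            exact ih rest' hlen' _ _ s.2.1 (by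
              intro x t hx hxart
              have := dropWhile_head_false (fun t => t.2.1 == s.2.1) rest x t (by rw [← hrest']; exact hx)
              simp [hxart] at this)
          rw [hA, durDictB_runs]
          simp [durDictB_fill, ← hrun, ← hrest']

-- ===== VERDICT (by name: the statement is the Claim_ definition above) =====
theorem durDict_spec : Claim_equal_durDict := by
  intro song_list _
  unfold Spec_durDict durDict durDict_alt
  rw [loop_eq_fill song_list.length song_list le_rfl PySem.Dict.empty 0 "" (by intro _ _ _ _; rfl)]
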